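-- pv_equiv track=rewrite | github.com/ru04ru041989/MOOC | Project_Euler/Q54.py | help_if_p1_win
-- ===== SOURCE A (Python) =====
-- def help_if_p1_win(p1_rank, p2_rank, time):
--
--     if p1_rank[-time][0] > p2_rank[-time][0]:
--         return 1
--     elif p1_rank[-time][0] < p2_rank[-time][0]:
--         return 0
--     else:
--
--         if p1_rank[-time][1] > p2_rank[-time][1]:
--             return 1
--         elif p1_rank[-time][1] < p2_rank[-time][1]:
--             return 0
--         else: # compair 2nd
--             return help_if_p1_win(p1_rank, p2_rank, time+1)
-- ===== SOURCE B (Python) =====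
-- def help_if_p1_win(p1_rank, p2_rank, time):
--     # Bounded scan over the candidate depths instead of unbounded recursion;
--     # one tuple comparison per depth instead of four scalar comparisons.
--     n = min(len(p1_rank), len(p2_rank))
--     for i in range(time, n + 1):
--         a = p1_rank[-i]
--         b = p2_rank[-i]
--         if a != b:
--             return 1 if a > b else 0
--     return 0
-- ===== Notes on version B (the rewrite author's own statement) =====
-- stated objective: alternative
-- what changed: Replaces the unbounded four-way-comparison recursion by a single bounded for-loop over the candidate depths range(time, min(len)+1) that does one tuple comparison per depth and decides the winner with Python's lexicographic tuple order.
import Mathlib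
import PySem

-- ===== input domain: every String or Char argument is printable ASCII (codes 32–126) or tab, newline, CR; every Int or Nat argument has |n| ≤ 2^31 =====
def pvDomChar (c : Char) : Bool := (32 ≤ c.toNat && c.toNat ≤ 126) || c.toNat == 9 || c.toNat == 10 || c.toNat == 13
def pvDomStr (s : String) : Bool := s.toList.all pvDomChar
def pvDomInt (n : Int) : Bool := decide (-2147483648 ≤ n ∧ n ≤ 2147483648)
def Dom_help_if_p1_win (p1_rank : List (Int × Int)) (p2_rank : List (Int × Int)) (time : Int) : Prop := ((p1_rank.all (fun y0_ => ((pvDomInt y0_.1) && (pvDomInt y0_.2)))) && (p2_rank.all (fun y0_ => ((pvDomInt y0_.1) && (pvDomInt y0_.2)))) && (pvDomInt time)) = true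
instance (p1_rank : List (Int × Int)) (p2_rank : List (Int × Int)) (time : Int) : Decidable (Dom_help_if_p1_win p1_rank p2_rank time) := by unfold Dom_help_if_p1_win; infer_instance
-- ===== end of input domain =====

-- B replaces the unbounded recursion with four scalar comparisons per depth by one bounded
-- loop over range(time, min(len)+1) with a single tuple comparison per depth (alternative
-- decomposition, same cost); where A raises IndexError the inputs lie outside Pre_.

-- ===== PORT A =====
def help_if_p1_win (p1_rank : List (Int × Int)) (p2_rank : List (Int × Int)) (time : Int) : Int :=
  match h1 : PySem.List.pyGet? p1_rank (-time), h2 : PySem.List.pyGet? p2_rank (-time) with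
  | some a, some b =>
    if a.1 > b.1 then 1
    else if a.1 < b.1 then 0
    else if a.2 > b.2 then 1
    else if a.2 < b.2 then 0
    else help_if_p1_win p1_rank p2_rank (time + 1)
  | _, _ => 0   -- IndexError in Python; excluded by Pre_
termination_by ((p1_rank.length : Int) + 1 - time).toNat
decreasing_by
  have hx : ¬ PySem.List.pyGet? p1_rank (-time) = none := by simp [h1]
  rw [PySem.List.pyGet?_eq_none_iff, not_not] at hx
  obtain ⟨hx1, _hx2⟩ := hx
  omega

-- ===== PORT B =====
def altGo (p1_rank : List (Int × Int)) (p2_rank : List (Int × Int)) : List Int → Int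
  | [] => 0
  | i :: rest =>
    match PySem.List.pyGet? p1_rank (-i), PySem.List.pyGet? p2_rank (-i) with
    | none, _ => 0       -- IndexError in Python (outside Pre_)
    | _, none => 0       -- IndexError in Python (outside Pre_)
    | some a, some b =>
      if a ≠ b then (if b.1 < a.1 ∨ (a.1 = b.1 ∧ b.2 < a.2) then 1 else 0)
      else altGo p1_rank p2_rank rest

def help_if_p1_win_alt (p1_rank : List (Int × Int)) (p2_rank : List (Int × Int)) (time : Int) : Int :=
  altGo p1_rank p2_rank
    (PySem.List.pyRange time (min (p1_rank.length : Int) (p2_rank.length : Int) + 1) 1)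

-- ===== PRECONDITION & SPEC =====
-- Pre_ = exactly the inputs on which A returns: the starting index is in range for both hands
-- and some depth in the scanned range shows a difference (on a total tie A raises IndexError).
def Pre_help_if_p1_win (p1_rank : List (Int × Int)) (p2_rank : List (Int × Int)) (time : Int) : Prop :=
  PySem.Raise.InRange p1_rank.length (-time) ∧ PySem.Raise.InRange p2_rank.length (-time) ∧
  ∃ i ∈ PySem.List.pyRange time (min (p1_rank.length : Int) (p2_rank.length : Int) + 1) 1,
    PySem.List.pyGet? p1_rank (-i) ≠ PySem.List.pyGet? p2_rank (-i)
instance (p1_rank : List (Int × Int)) (p2_rank : List (Int × Int)) (time : Int) : Decidable (Pre_help_if_p1_win p1_rank p2_rank time) := by unfold Pre_help_if_p1_win; infer_instance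

def pvWitness_help_if_p1_win : (List (Int × Int)) × (List (Int × Int)) × Int := ([(1, 2)], [(1, 1)], 1)

def Spec_help_if_p1_win (p1_rank : List (Int × Int)) (p2_rank : List (Int × Int)) (time : Int) (out : Int) : Prop := out = help_if_p1_win_alt p1_rank p2_rank time
instance (p1_rank : List (Int × Int)) (p2_rank : List (Int × Int)) (time : Int) (out : Int) : Decidable (Spec_help_if_p1_win p1_rank p2_rank time out) := by unfold Spec_help_if_p1_win; infer_instance

-- ===== CLAIM (what is proved, stated in full; the proofs are below) =====
def Claim_equal_help_if_p1_win : Prop := ∀ (p1_rank : List (Int × Int)) (p2_rank : List (Int × Int)) (time : Int), Dom_help_if_p1_win p1_rank p2_rank time → Pre_help_if_p1_win p1_rank p2_rank time → Spec_help_if_p1_win p1_rank p2_rank time (help_if_p1_win p1_rank p2_rank time)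

-- ===== LEMMAS AND PROOFS =====
theorem key_agree (p1 p2 : List (Int × Int)) (k : Nat) :
    ∀ time : Int,
      ((min (p1.length : Int) (p2.length : Int) + 1 - time)).toNat ≤ k →
      Pre_help_if_p1_win p1 p2 time →
      help_if_p1_win p1 p2 time =
        altGo p1 p2 (PySem.List.pyRange time (min (p1.length : Int) (p2.length : Int) + 1) 1) := by
  induction k with
  | zero =>
    intro time hk hpre
    obtain ⟨h1, h2, i, hi, hne⟩ := hpre
    rw [PySem.List.mem_pyRange_one] at hi
    omega
  | succ k ih =>
    intro time hk hpre
    obtain ⟨h1, h2, i, hi, hne⟩ := hpre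
    rw [PySem.List.mem_pyRange_one] at hi
    obtain ⟨hl1, hl1'⟩ := h1
    obtain ⟨hl2, hl2'⟩ := h2
    have ha : ∃ a, PySem.List.pyGet? p1 (-time) = some a := by
      cases hA : PySem.List.pyGet? p1 (-time) with
      | none =>
        rw [PySem.List.pyGet?_eq_none_iff] at hA
        exact absurd ⟨hl1, hl1'⟩ hA
      | some a => exact ⟨a, rfl⟩
    have hb : ∃ b, PySem.List.pyGet? p2 (-time) = some b := by
      cases hB : PySem.List.pyGet? p2 (-time) with
      | none =>
        rw [PySem.List.pyGet?_eq_none_iff] at hB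
        exact absurd ⟨hl2, hl2'⟩ hB
      | some b => exact ⟨b, rfl⟩
    obtain ⟨a, hA⟩ := ha
    obtain ⟨b, hB⟩ := hb
    rw [PySem.List.pyRange_one_cons (by omega)]
    rw [help_if_p1_win.eq_def, altGo]
    simp only [hA, hB]
    split
    case _ a' b' hA' hB' =>
     rw [hA] at hA'
     rw [hB] at hB'
     injection hA' with ha'
     injection hB' with hb'
     subst ha'
     subst hb'
     by_cases hab : a = b
     · subst hab
       simp only [lt_irrefl, ne_eq, not_true_eq_false, if_false]
       apply ih (time + 1) (by omega)
       have hit : i ≠ time := by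
         intro hE
         exact hne (by rw [hE, hA, hB])
       refine ⟨⟨by omega, by omega⟩, ⟨by omega, by omega⟩, i, ?_, hne⟩
       rw [PySem.List.mem_pyRange_one]
       omega
     · have hcomp : a.1 ≠ b.1 ∨ a.2 ≠ b.2 := by
         by_contra hc
         rw [not_or, not_not, not_not] at hc
         exact hab (Prod.ext hc.1 hc.2)
       simp only [ne_eq, hab, not_false_eq_true, if_true]
       split_ifs <;> omega
    case _ =>
     simp_all

-- ===== VERDICT (by name: the statement is the Claim_ definition above) =====
theorem help_if_p1_win_spec : Claim_equal_help_if_p1_win := by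
  intro p1 p2 time _ hpre
  unfold Spec_help_if_p1_win help_if_p1_win_alt
  exact key_agree p1 p2 _ time le_rfl hpre
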